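-- pv_equiv track=rewrite | github.com/RHESGroup/prolepsis | risc-v-cfi-tool/sign_generation_grouping.py | brecking
-- ===== SOURCE A (Python) =====
-- def brecking(x):
--     powers = []
--     i = 1
--     while i <= x:
--         if i & x:
--             powers.append(i)
--         i <<= 1
--     return powers
-- ===== SOURCE B (Python) =====
-- def brecking(x):
--     powers = []
--     while x > 0:
--         lb = x & -x
--         powers.append(lb)
--         x -= lb
--     return powers
-- ===== Notes on version B (the rewrite author's own statement) =====
-- stated objective: alternative
-- what changed: Instead of scanning every power of two up to x and testing it against x, B repeatedly extracts the lowest set bit with x & -x and subtracts it, iterating only over the set bits.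
import Mathlib
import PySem

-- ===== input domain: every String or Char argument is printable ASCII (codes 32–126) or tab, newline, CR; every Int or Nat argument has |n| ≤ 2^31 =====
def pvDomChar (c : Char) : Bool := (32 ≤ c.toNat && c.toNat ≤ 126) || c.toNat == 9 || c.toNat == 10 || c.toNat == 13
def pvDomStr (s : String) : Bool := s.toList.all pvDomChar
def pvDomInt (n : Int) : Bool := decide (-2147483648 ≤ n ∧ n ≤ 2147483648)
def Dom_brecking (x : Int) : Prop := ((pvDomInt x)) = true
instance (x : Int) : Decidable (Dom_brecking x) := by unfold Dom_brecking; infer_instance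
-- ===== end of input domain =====

-- B replaces A's scan of every power of two up to x by repeated extraction of the
-- lowest set bit (x & -x); same return value for every int x (alternative algorithm).

-- ===== PORT A =====
-- `i <<= 1` is multiplication by 2 (cited by the port's termination proof)
theorem pvShl1 (i : Int) : i <<< (1 : Nat) = 2 * i := by
  rw [Int.shiftLeft_eq]; ring

-- while i <= x: if i & x: powers.append(i); i <<= 1   (hi is the invariant 1 ≤ i, needed for termination)
def breckingLoop (x i : Int) (hi : 0 < i) (acc : List Int) : List Int :=
  if i ≤ x then
    breckingLoop x (i <<< (1 : Nat)) (by rw [pvShl1]; omega)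
      (if PySem.Int.band i x ≠ 0 then acc ++ [i] else acc)
  else acc
termination_by (x + 1 - i).toNat
decreasing_by rw [pvShl1]; omega

def brecking (x : Int) : List Int := breckingLoop x 1 (by omega) []

-- ===== PORT B =====
-- 0 < x & -x and x & -x ≤ x for 0 < x (cited by the port's termination proof)
theorem pvLowbitBounds (x : Int) (hx : 0 < x) :
    0 < PySem.Int.band x (-x) ∧ PySem.Int.band x (-x) ≤ x := by
  have h1 : x.toNat &&& (x.toNat - 1) ≤ x.toNat - 1 := Nat.and_le_right
  unfold PySem.Int.band
  have hx' : ¬ (0 ≤ -x) := by omega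
  simp only [if_pos (le_of_lt hx), if_neg hx']
  have : (-(-x) - 1).toNat = x.toNat - 1 := by omega
  rw [this]
  omega

-- while x > 0: lb = x & -x; powers.append(lb); x -= lb
def altLoop (x : Int) (acc : List Int) : List Int :=
  if h : 0 < x then
    -- h is used by the termination proof
    altLoop (x - PySem.Int.band x (-x)) (acc ++ [PySem.Int.band x (-x)])
  else acc
termination_by x.toNat
decreasing_by have := pvLowbitBounds x h; omega

def brecking_alt (x : Int) : List Int := altLoop x []

-- ===== PRECONDITION & SPEC =====
def Spec_brecking (x : Int) (out : List Int) : Prop := out = brecking_alt x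
instance (x : Int) (out : List Int) : Decidable (Spec_brecking x out) := by unfold Spec_brecking; infer_instance

-- ===== CLAIM (what is proved, stated in full; the proofs are below) =====
def Claim_equal_brecking : Prop := ∀ (x : Int), Dom_brecking x → Spec_brecking x (brecking x)

-- ===== LEMMAS AND PROOFS =====

-- canonical binary decomposition: list of powers of two, ascending
def bitsAux : Nat → List Int
  | 0 => []
  | n + 1 =>
    (if (n + 1) % 2 = 1 then [1] else []) ++ (bitsAux ((n + 1) / 2)).map (· * 2)
decreasing_by omega

theorem bitsAux_pos (n : Nat) (hn : 0 < n) :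
    bitsAux n = (if n % 2 = 1 then [1] else []) ++ (bitsAux (n / 2)).map (· * 2) := by
  obtain ⟨m, rfl⟩ : ∃ m, n = m + 1 := ⟨n - 1, by omega⟩
  rw [bitsAux]

-- Nat bitwise facts, by testBit extensionality
theorem landDouble (a b : Nat) (u v : Bool) :
    (2 * a + u.toNat) &&& (2 * b + v.toNat) = 2 * (a &&& b) + (u && v).toNat := by
  apply Nat.eq_of_testBit_eq
  intro i
  cases i with
  | zero =>
    rw [Nat.testBit_land]
    simp only [Nat.testBit_zero]
    cases u <;> cases v <;> simp
  | succ i =>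
    have e1 : (2 * a + u.toNat) / 2 = a := by
      cases u <;> simp <;> omega
    have e2 : (2 * b + v.toNat) / 2 = b := by
      cases v <;> simp <;> omega
    have e3 : (2 * (a &&& b) + (u && v).toNat) / 2 = a &&& b := by
      cases u <;> cases v <;> simp <;> omega
    rw [Nat.testBit_land]
    simp only [Nat.testBit_succ, e1, e2, e3]
    rw [Nat.testBit_land]

theorem landOne (n : Nat) : 1 &&& n = n % 2 := by
  apply Nat.eq_of_testBit_eq
  intro i
  cases i with
  | zero =>
    have h2 : n % 2 % 2 = n % 2 := by omega
    rw [Nat.testBit_land]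
    simp [Nat.testBit_zero, h2]
  | succ i =>
    have : n % 2 / 2 = 0 := by omega
    rw [Nat.testBit_land]
    simp [Nat.testBit_succ, this]

-- the Nat-level lowest set bit
def lowN (n : Nat) : Nat := n - (n &&& (n - 1))

theorem lowbit_eq (x : Int) (hx : 0 < x) :
    PySem.Int.band x (-x) = (lowN x.toNat : Nat) := by
  unfold PySem.Int.band lowN
  have hx' : ¬ (0 ≤ -x) := by omega
  simp only [if_pos (le_of_lt hx), if_neg hx']
  have : (-(-x) - 1).toNat = x.toNat - 1 := by omega
  rw [this]

theorem lowN_odd (m : Nat) : lowN (2 * m + 1) = 1 := by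
  have h := landDouble m m true false
  simp at h
  unfold lowN
  have e : 2 * m + 1 - 1 = 2 * m := by omega
  rw [e, h]
  omega

theorem lowN_even (m : Nat) (hm : 0 < m) : lowN (2 * m) = 2 * lowN m := by
  have h := landDouble m (m - 1) false true
  simp at h
  have hle : m &&& (m - 1) ≤ m - 1 := Nat.and_le_right
  unfold lowN
  have e : 2 * m - 1 = 2 * (m - 1) + 1 := by omega
  rw [e, h]
  omega

-- accumulator lemmas
theorem breckingLoop_acc (x : Int) :
    ∀ (n : Nat) (i : Int) (hi : 0 < i), (x + 1 - i).toNat = n →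
      ∀ acc, breckingLoop x i hi acc = acc ++ breckingLoop x i hi [] := by
  intro n
  induction n using Nat.strong_induction_on with
  | _ n IH =>
    intro i hi hn acc
    conv_lhs => rw [breckingLoop]
    conv_rhs => rw [breckingLoop]
    by_cases h : i ≤ x
    · simp only [if_pos h]
      have hm : (x + 1 - i <<< (1 : Nat)).toNat < n := by rw [pvShl1]; omega
      rw [IH _ hm _ (by rw [pvShl1]; omega) rfl
            (if PySem.Int.band i x ≠ 0 then acc ++ [i] else acc),
          IH _ hm _ (by rw [pvShl1]; omega) rfl
            (if PySem.Int.band i x ≠ 0 then [] ++ [i] else [])]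
      by_cases hc : PySem.Int.band i x ≠ 0 <;> simp [hc]
    · simp [if_neg h]

theorem altLoop_acc :
    ∀ (n : Nat) (x : Int), x.toNat = n →
      ∀ acc, altLoop x acc = acc ++ altLoop x [] := by
  intro n
  induction n using Nat.strong_induction_on with
  | _ n IH =>
    intro x hn acc
    conv_lhs => rw [altLoop]
    conv_rhs => rw [altLoop]
    by_cases h : 0 < x
    · simp only [dif_pos h]
      have hb := pvLowbitBounds x h
      have hm : (x - PySem.Int.band x (-x)).toNat < n := by omega
      rw [IH _ hm _ rfl (acc ++ [PySem.Int.band x (-x)]),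
          IH _ hm _ rfl ([] ++ [PySem.Int.band x (-x)])]
      simp
    · simp [dif_neg h]

-- index congruence for A's loop (the positivity proof argument is irrelevant)
theorem loopA_congr (x : Int) {i j : Int} (e : i = j) (hi : 0 < i) (hj : 0 < j)
    (acc : List Int) : breckingLoop x i hi acc = breckingLoop x j hj acc := by
  subst e; rfl

-- doubling lemma for A's loop: scanning 2k+r (r ∈ {0,1}) from even position 2i
-- collects exactly twice what scanning k from i collects
theorem breckingLoop_double :
    ∀ (n : Nat) (k i : Int) (hi : 0 < i), (k + 1 - i).toNat = n →
      ∀ (r : Int), (r = 0 ∨ r = 1) →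
        breckingLoop (2 * k + r) (2 * i) (by omega) [] =
          (breckingLoop k i hi []).map (· * 2) := by
  intro n
  induction n using Nat.strong_induction_on with
  | _ n IH =>
    intro k i hi hn r hr
    conv_lhs => rw [breckingLoop]
    conv_rhs => rw [breckingLoop]
    by_cases h : i ≤ k
    · have h2 : 2 * i ≤ 2 * k + r := by omega
      simp only [if_pos h, if_pos h2]
      have hk : (0:Int) < k := by omega
      have hband : PySem.Int.band (2 * i) (2 * k + r) = 2 * PySem.Int.band i k := by
        rw [PySem.Int.band_of_nonneg (by omega) (by omega),
            PySem.Int.band_of_nonneg (by omega) (by omega)]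
        have e1 : (2 * i).toNat = 2 * i.toNat + (false : Bool).toNat := by simp; omega
        have e2 : (2 * k + r).toNat = 2 * k.toNat + (decide (r = 1) : Bool).toNat := by
          rcases hr with rfl | rfl <;> simp <;> omega
        rw [e1, e2, landDouble]
        rcases hr with rfl | rfl <;> simp
      have hsh : (0:Int) < i <<< (1 : Nat) := by rw [pvShl1]; omega
      have hsh2 : (0:Int) < (2 * i) <<< (1 : Nat) := by rw [pvShl1]; omega
      have hm : (k + 1 - (i <<< (1 : Nat))).toNat < n := by rw [pvShl1]; omega
      rw [breckingLoop_acc (2 * k + r) _ _ hsh2 rfl,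
          breckingLoop_acc k _ _ hsh rfl, List.map_append]
      have estep : breckingLoop (2 * k + r) ((2 * i) <<< (1 : Nat)) hsh2 [] =
          (breckingLoop k (i <<< (1 : Nat)) hsh []).map (· * 2) := by
        rw [loopA_congr (2 * k + r)
              (show (2 * i) <<< (1 : Nat) = 2 * (i <<< (1 : Nat)) by
                simp only [pvShl1, mul_assoc])
              hsh2 (by rw [pvShl1]; omega) []]
        exact IH _ hm k (i <<< (1 : Nat)) hsh rfl r hr
      rw [estep, hband]
      by_cases hc : PySem.Int.band i k ≠ 0
      · simp only [if_pos hc, if_pos (by omega : (2 : Int) * PySem.Int.band i k ≠ 0)]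
        simp [mul_comm]
      · simp only [if_neg hc]
        have : ¬ ((2 : Int) * PySem.Int.band i k ≠ 0) := by omega
        simp [this]
    · have h2 : ¬ (2 * i ≤ 2 * k + r) := by omega
      simp [if_neg h, if_neg h2]

theorem brecking_eq_bits : ∀ (n : Nat) (x : Int), x.toNat = n → brecking x = bitsAux n := by
  intro n
  induction n using Nat.strong_induction_on with
  | _ n IH =>
    intro x hn
    unfold brecking
    rw [breckingLoop]
    by_cases h : (1 : Int) ≤ x
    · simp only [if_pos h]
      have hn0 : 0 < n := by omega
      have hband : PySem.Int.band 1 x = ((n % 2 : Nat) : Int) := by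
        rw [PySem.Int.band_of_nonneg (by omega) (by omega)]
        norm_num [landOne, hn]
      have hsh : (0:Int) < (1 : Int) <<< (1 : Nat) := by rw [pvShl1]; norm_num
      rw [breckingLoop_acc x _ _ hsh rfl]
      have hx : x = 2 * (x / 2) + x % 2 := by omega
      have hr : x % 2 = 0 ∨ x % 2 = 1 := by omega
      have hrec : breckingLoop x ((1 : Int) <<< (1 : Nat)) hsh [] =
          (breckingLoop (x / 2) 1 (by omega) []).map (· * 2) := by
        rw [loopA_congr x (pvShl1 1) hsh (by norm_num) []]
        conv_lhs => rw [hx]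
        exact breckingLoop_double (x / 2 + 1 - 1).toNat (x / 2) 1 (by omega) rfl (x % 2) hr
      rw [hrec]
      have hsub : breckingLoop (x / 2) 1 (by omega) [] = bitsAux (n / 2) := by
        have : (x / 2).toNat = n / 2 := by omega
        exact IH (n / 2) (by omega) (x / 2) this
      rw [hsub, bitsAux_pos n hn0]
      have hmod : (PySem.Int.band 1 x ≠ 0) ↔ n % 2 = 1 := by
        rw [hband]; omega
      by_cases hc : n % 2 = 1
      · simp [hmod.mpr hc, hc]
      · have : ¬ (PySem.Int.band 1 x ≠ 0) := fun hh => hc (hmod.mp hh)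
        simp [this, hc]
    · simp only [if_neg h]
      have : n = 0 := by omega
      rw [this, bitsAux]

-- doubling lemma for B's loop
theorem altLoop_double :
    ∀ (n : Nat) (k : Int), k.toNat = n → altLoop (2 * k) [] = (altLoop k []).map (· * 2) := by
  intro n
  induction n using Nat.strong_induction_on with
  | _ n IH =>
    intro k hn
    conv_lhs => rw [altLoop]
    conv_rhs => rw [altLoop]
    by_cases h : 0 < k
    · have h2 : (0:Int) < 2 * k := by omega
      simp only [dif_pos h, dif_pos h2]
      have hb := pvLowbitBounds k h
      have hlowk := lowbit_eq k h
      have hlow2 : PySem.Int.band (2 * k) (-(2 * k)) = 2 * PySem.Int.band k (-k) := by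
        rw [lowbit_eq _ h2, hlowk]
        have e : (2 * k).toNat = 2 * k.toNat := by omega
        rw [e, lowN_even k.toNat (by omega)]
        push_cast
        ring
      have hm : (k - PySem.Int.band k (-k)).toNat < n := by omega
      have hsub : 2 * k - PySem.Int.band (2 * k) (-(2 * k)) =
          2 * (k - PySem.Int.band k (-k)) := by rw [hlow2]; ring
      rw [altLoop_acc (2 * k - PySem.Int.band (2 * k) (-(2 * k))).toNat _ rfl,
          altLoop_acc (k - PySem.Int.band k (-k)).toNat _ rfl]
      rw [List.map_append, hsub, IH _ hm _ rfl, hlow2]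
      simp [mul_comm]
    · have h2 : ¬ ((0:Int) < 2 * k) := by omega
      simp [dif_neg h]

theorem alt_eq_bits : ∀ (n : Nat) (x : Int), x.toNat = n → brecking_alt x = bitsAux n := by
  intro n
  induction n using Nat.strong_induction_on with
  | _ n IH =>
    intro x hn
    unfold brecking_alt
    by_cases h : 0 < x
    · have hn0 : 0 < n := by omega
      rw [bitsAux_pos n hn0]
      by_cases hodd : n % 2 = 1
      · -- lowest bit is 1; x - 1 is even
        have hlow : PySem.Int.band x (-x) = 1 := by
          rw [lowbit_eq x h]
          have e : x.toNat = 2 * (n / 2) + 1 := by omega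
          rw [e, lowN_odd]
          simp
        rw [altLoop]
        simp only [dif_pos h, hlow]
        rw [altLoop_acc (x - 1).toNat _ rfl]
        have hx : x - 1 = 2 * ((x - 1) / 2) := by omega
        have hdiv : ((x - 1) / 2).toNat = n / 2 := by omega
        rw [hx, altLoop_double (n / 2) _ hdiv]
        have : altLoop ((x - 1) / 2) [] = bitsAux (n / 2) := by
          have := IH (n / 2) (by omega) ((x - 1) / 2) hdiv
          unfold brecking_alt at this
          exact this
        rw [this]
        simp [hodd]
      · -- even: x = 2 * (x / 2)
        have hx : x = 2 * (x / 2) := by omega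
        have hdiv : (x / 2).toNat = n / 2 := by omega
        conv_lhs => rw [hx]
        rw [altLoop_double (n / 2) _ hdiv]
        have : altLoop (x / 2) [] = bitsAux (n / 2) := by
          have := IH (n / 2) (by omega) (x / 2) hdiv
          unfold brecking_alt at this
          exact this
        rw [this]
        simp [hodd]
    · rw [altLoop]
      simp only [dif_neg h]
      have : n = 0 := by omega
      rw [this, bitsAux]

-- ===== VERDICT (by name: the statement is the Claim_ definition above) =====
theorem brecking_spec : Claim_equal_brecking := by
  intro x _
  unfold Spec_brecking
  rw [brecking_eq_bits x.toNat x rfl, alt_eq_bits x.toNat x rfl]
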